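-- pv_equiv track=rewrite | github.com/HONOOUR/Algorithm_Test | Algorithm_Python/old/leetCode_1.py | solutions
-- ===== SOURCE A (Python) =====
-- def solutions(S):
--     substrings = []
--     start = 0
--     end = 0
--     strings = list(S)
--     for s in S:
--         if strings.count(s.upper()) > 0 and strings.count(s.lower()) > 0:
--             end += 1
--         else:
--             temp = S[start:end]
--             substrings.append(temp)
--             start = end+1
--             end = start
--
--     if end == len(S):
--         substrings.append(S[start:end])
--
--     length = 0
--     for string in substrings:
--         count = len(string)
--         temp = 0
--         for s in string:
--             if strings.count(s.upper()) > 0 and strings.count(s.lower()) > 0: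
--                 temp += 1
--         if count == temp:
--             length = max(length, count)
--
--     if length == 0 or length == 1:
--         return -1
--     else:
--         return length
-- ===== SOURCE B (Python) =====
-- def solutions(S):
--     present = set(S)
--     best = 0
--     cur = 0
--     for c in S:
--         if c.upper() in present and c.lower() in present:
--             cur += 1
--             if cur > best:
--                 best = cur
--         else:
--             cur = 0
--     return best if best > 1 else -1
-- ===== Notes on version B (the rewrite author's own statement) =====
-- stated objective: faster
-- what changed: Replaces A's build-a-list-of-segments pass plus a second measuring pass with repeated list.count membership scans by one single-pass running-counter scan over a precomputed character set.
import Mathlib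
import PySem

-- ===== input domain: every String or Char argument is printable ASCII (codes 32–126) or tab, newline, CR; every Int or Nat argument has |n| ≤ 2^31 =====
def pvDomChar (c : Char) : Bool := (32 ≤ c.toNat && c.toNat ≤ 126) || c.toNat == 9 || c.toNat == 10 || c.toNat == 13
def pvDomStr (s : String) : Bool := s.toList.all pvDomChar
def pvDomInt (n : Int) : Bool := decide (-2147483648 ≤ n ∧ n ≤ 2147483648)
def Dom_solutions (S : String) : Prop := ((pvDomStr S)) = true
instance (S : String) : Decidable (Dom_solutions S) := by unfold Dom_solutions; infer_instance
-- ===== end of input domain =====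

-- B replaces A's two-pass build-segments-then-measure algorithm (with repeated list.count scans) by a
-- single running-counter pass over a precomputed membership set; measurably faster (O(n) vs O(n^2)).

-- ===== PORT A =====
-- A's repeated test 'strings.count(s.upper()) > 0 and strings.count(s.lower()) > 0'
-- (exact on the printable-ASCII domain, where .upper()/.lower() of a 1-char string is 1 char)
def aGood (strings : List Char) (s : Char) : Bool :=
  decide (0 < PySem.List.count strings (PySem.Chars.upperChar s)) &&
  decide (0 < PySem.List.count strings (PySem.Chars.lowerChar s))

def solutions (S : String) : Int :=
  let strings := S.toList
  let st := strings.foldl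
    (fun (acc : List (List Char) × Int × Int) s =>
      if aGood strings s then
        (acc.1, acc.2.1, acc.2.2 + 1)
      else
        (acc.1 ++ [PySem.List.slice strings (some acc.2.1) (some acc.2.2)],
         acc.2.2 + 1, acc.2.2 + 1))
    ([], 0, 0)
  let substrings :=
    if st.2.2 == (strings.length : Int) then
      st.1 ++ [PySem.List.slice strings (some st.2.1) (some st.2.2)]
    else st.1
  let length := substrings.foldl
    (fun len str =>
      if ((str.length : Int)) == (str.foldl (fun t s => if aGood strings s then t + 1 else t) 0) then
        max len (str.length : Int)
      else len) 0
  if length == 0 || length == 1 then -1 else length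

-- ===== PORT B =====
-- B's test 'c.upper() in present and c.lower() in present'
def bGood (present : PySem.Set Char) (c : Char) : Bool :=
  PySem.Set.contains present (PySem.Chars.upperChar c) &&
  PySem.Set.contains present (PySem.Chars.lowerChar c)

def solutions_alt (S : String) : Int :=
  let present : PySem.Set Char := PySem.Set.ofList S.toList
  let st := S.toList.foldl
    (fun (acc : Int × Int) c =>
      if bGood present c then
        (if acc.1 < acc.2 + 1 then acc.2 + 1 else acc.1, acc.2 + 1)
      else (acc.1, 0))
    (0, 0)
  if 1 < st.1 then st.1 else -1

-- ===== PRECONDITION & SPEC =====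
def Spec_solutions (S : String) (out : Int) : Prop := out = solutions_alt S
instance (S : String) (out : Int) : Decidable (Spec_solutions S out) := by unfold Spec_solutions; infer_instance

-- ===== CLAIM (what is proved, stated in full; the proofs are below) =====
def Claim_equal_solutions : Prop := ∀ (S : String), Dom_solutions S → Spec_solutions S (solutions S)

-- ===== LEMMAS AND PROOFS =====

-- the common membership test both programs compute
def gS (S : String) (c : Char) : Bool :=
  S.toList.contains (PySem.Chars.upperChar c) && S.toList.contains (PySem.Chars.lowerChar c)

-- A's loop step / postprocessing, and B's step, with the test abstracted
def fA (g : Char → Bool) (full : List Char) (acc : List (List Char) × Int × Int) (s : Char) :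
    List (List Char) × Int × Int :=
  if g s then (acc.1, acc.2.1, acc.2.2 + 1)
  else (acc.1 ++ [PySem.List.slice full (some acc.2.1) (some acc.2.2)], acc.2.2 + 1, acc.2.2 + 1)

def finishA (g : Char → Bool) (full : List Char) (st : List (List Char) × Int × Int) : Int :=
  let substrings :=
    if st.2.2 == (full.length : Int) then
      st.1 ++ [PySem.List.slice full (some st.2.1) (some st.2.2)]
    else st.1
  let length := substrings.foldl
    (fun len str =>
      if ((str.length : Int)) == (str.foldl (fun t s => if g s then t + 1 else t) 0) then
        max len (str.length : Int)
      else len) 0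
  if length == 0 || length == 1 then -1 else length

def fB (g : Char → Bool) (acc : Int × Int) (c : Char) : Int × Int :=
  if g c then (if acc.1 < acc.2 + 1 then acc.2 + 1 else acc.1, acc.2 + 1) else (acc.1, 0)

def maxLen (subs : List (List Char)) : Int :=
  subs.foldl (fun a t => max a ((t.length : Int))) 0

lemma aGood_eq_gS (S : String) (c : Char) : aGood S.toList c = gS S c := by
  simp [aGood, gS, PySem.List.count_eq, List.count_pos_iff]

lemma bGood_eq_gS (S : String) (c : Char) : bGood (PySem.Set.ofList S.toList) c = gS S c := by
  simp [bGood, gS, PySem.Set.contains, PySem.Set.mem_ofList]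

lemma maxLen_append_singleton (subs : List (List Char)) (t : List Char) :
    maxLen (subs ++ [t]) = max (maxLen subs) (t.length : Int) := by
  simp [maxLen, List.foldl_append]

lemma maxLen_nonneg (subs : List (List Char)) : 0 ≤ maxLen subs :=
  (PySem.List.le_foldl_max_int subs (fun t => (t.length : Int)) 0).1

lemma slice_runs (p0 r tail : List Char) :
    PySem.List.slice (p0 ++ (r ++ tail)) (some (p0.length : Int))
      (some ((p0.length : Int) + (r.length : Int))) = r := by
  rw [PySem.List.slice_natCast_add]
  rw [List.drop_left, List.take_left]

lemma secondLoop_eq_maxLen (g : Char → Bool) (subs : List (List Char))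
    (h : ∀ t ∈ subs, ∀ c ∈ t, g c = true) :
    subs.foldl
      (fun len str =>
        if ((str.length : Int)) == (str.foldl (fun t s => if g s then t + 1 else t) 0) then
          max len (str.length : Int)
        else len) 0 = maxLen subs := by
  unfold maxLen
  apply PySem.List.foldl_congr_mem
  intro acc str hmem
  have hcount : str.foldl (fun t s => if g s then t + 1 else t) 0 = (str.length : Int) := by
    rw [PySem.List.foldl_if_add_one]
    rw [List.countP_eq_length.mpr (fun c hc => h str hmem c hc)]
    simp
  simp [hcount]

lemma core (g : Char → Bool) (full : List Char) :
    ∀ (rest p0 r : List Char) (subs : List (List Char)) (best : Int),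
      full = p0 ++ (r ++ rest) →
      (∀ t ∈ subs, ∀ c ∈ t, g c = true) →
      (∀ c ∈ r, g c = true) →
      best = max (maxLen subs) (r.length : Int) →
      finishA g full
        (rest.foldl (fA g full) (subs, (p0.length : Int), (p0.length : Int) + (r.length : Int)))
      = (if 1 < (rest.foldl (fB g) (best, (r.length : Int))).1
          then (rest.foldl (fB g) (best, (r.length : Int))).1 else -1) := by
  intro rest
  induction rest with
  | nil =>
    intro p0 r subs best hfull hsubs hr hbest
    simp only [List.foldl_nil]
    unfold finishA
    have hlen : (((p0.length : Int) + (r.length : Int)) == ((full.length : Int))) = true := by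
      simp [hfull, beq_iff_eq]
    simp only [hlen, if_true]
    have hsl : PySem.List.slice full (some (p0.length : Int))
        (some ((p0.length : Int) + (r.length : Int))) = r := by
      rw [hfull]; exact slice_runs p0 r []
    rw [hsl]
    have hall : ∀ t ∈ subs ++ [r], ∀ c ∈ t, g c = true := by
      intro t ht c hc
      rcases List.mem_append.mp ht with h1 | h1
      · exact hsubs t h1 c hc
      · simp at h1; subst h1; exact hr c hc
    rw [secondLoop_eq_maxLen g (subs ++ [r]) hall, maxLen_append_singleton, ← hbest]
    have h0 : 0 ≤ best := by
      have := maxLen_nonneg subs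
      omega
    by_cases h1 : 1 < best
    · have : (best == 0 || best == 1) = false := by
        simp [beq_iff_eq]; omega
      simp [this, h1]
    · have : (best == 0 || best == 1) = true := by
        simp [beq_iff_eq]; omega
      simp [this, h1]
  | cons x rest' ih =>
    intro p0 r subs best hfull hsubs hr hbest
    simp only [List.foldl_cons]
    by_cases hx : g x = true
    · -- good char: extend the current run
      have hlen1 : (((r ++ [x]).length : Nat) : Int) = (r.length : Int) + 1 := by
        simp
      have hA : fA g full (subs, (p0.length : Int), (p0.length : Int) + (r.length : Int)) x
          = (subs, (p0.length : Int), (p0.length : Int) + ((r ++ [x]).length : Int)) := by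
        simp [fA, hx, hlen1]; ring
      have hB : fB g (best, (r.length : Int)) x
          = ((if best < (r.length : Int) + 1 then (r.length : Int) + 1 else best),
             ((r ++ [x]).length : Int)) := by
        simp [fB, hx, hlen1]
      rw [hA, hB]
      apply ih p0 (r ++ [x]) subs
      · simpa using hfull
      · exact hsubs
      · intro c hc
        rcases List.mem_append.mp hc with h1 | h1
        · exact hr c h1
        · simp at h1; subst h1; exact hx
      · rw [hbest]
        simp only [List.length_append, List.length_cons, List.length_nil]
        push_cast
        omega
    · -- bad char: close the current run
      have hx' : g x = false := by simpa using hx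
      have hsl : PySem.List.slice full (some (p0.length : Int))
          (some ((p0.length : Int) + (r.length : Int))) = r := by
        rw [hfull]; exact slice_runs p0 r (x :: rest')
      have hA : fA g full (subs, (p0.length : Int), (p0.length : Int) + (r.length : Int)) x
          = (subs ++ [r], (((p0 ++ r ++ [x]).length : Nat) : Int),
             (((p0 ++ r ++ [x]).length : Nat) : Int) + (([] : List Char).length : Int)) := by
        simp [fA, hx', hsl, List.length_append]
        push_cast
        constructor <;> ring
      have hB : fB g (best, (r.length : Int)) x = (best, (([] : List Char).length : Int)) := by
        simp [fB, hx']
      rw [hA, hB]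
      apply ih (p0 ++ r ++ [x]) [] (subs ++ [r])
      · simp [hfull]
      · intro t ht c hc
        rcases List.mem_append.mp ht with h1 | h1
        · exact hsubs t h1 c hc
        · simp at h1; subst h1; exact hr c hc
      · intro c hc; simp at hc
      · rw [maxLen_append_singleton, ← hbest]
        have h0 : 0 ≤ best := by
          have := maxLen_nonneg subs
          omega
        simp; omega

lemma solutions_eq_g (S : String) :
    solutions S = finishA (gS S) S.toList (S.toList.foldl (fA (gS S) S.toList) ([], 0, 0)) := by
  simp only [solutions, finishA, aGood_eq_gS]
  rfl

lemma solutions_alt_eq_g (S : String) :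
    solutions_alt S =
      (if 1 < (S.toList.foldl (fB (gS S)) (0, 0)).1
        then (S.toList.foldl (fB (gS S)) (0, 0)).1 else -1) := by
  simp only [solutions_alt, bGood_eq_gS]
  rfl

-- ===== VERDICT (by name: the statement is the Claim_ definition above) =====
theorem solutions_spec : Claim_equal_solutions := by
  intro S _
  unfold Spec_solutions
  rw [solutions_eq_g, solutions_alt_eq_g]
  have := core (gS S) S.toList S.toList [] [] [] 0 (by simp)
    (by intro t ht; simp at ht) (by intro c hc; simp at hc) (by simp [maxLen])
  simpa using this
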